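-- pv_equiv track=rewrite | github.com/matej-vanek/dp | Kod/old/Histograms.py | deletions
-- ===== SOURCE A (Python) =====
-- def deletions(series):
--     dels = 0
--     last = ""
--     for item in series:
--         if not isinstance(item, str):
--             item = ""
--         if len(item) < len(last):
--             dels += 1
--         last = item
--     return dels
-- ===== SOURCE B (Python) =====
-- def deletions(series):
--     lens = [len(x) if isinstance(x, str) else 0 for x in series]
--
--     def count(lo, hi):
--         # number of descents lens[i] < lens[i-1] for lo < i < hi, by divide and conquer
--         if hi - lo < 2:
--             return 0
--         mid = (lo + hi) // 2
--         return count(lo, mid) + count(mid, hi) + (1 if lens[mid] < lens[mid - 1] else 0)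
--
--     return count(0, len(lens))
-- ===== Notes on version B (the rewrite author's own statement) =====
-- stated objective: alternative
-- what changed: Replaces A's single left-to-right pass with a running 'last' accumulator by a divide-and-conquer recursion over index ranges of a precomputed lengths table: each half is counted independently and the single boundary pair is added.
import Mathlib
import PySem

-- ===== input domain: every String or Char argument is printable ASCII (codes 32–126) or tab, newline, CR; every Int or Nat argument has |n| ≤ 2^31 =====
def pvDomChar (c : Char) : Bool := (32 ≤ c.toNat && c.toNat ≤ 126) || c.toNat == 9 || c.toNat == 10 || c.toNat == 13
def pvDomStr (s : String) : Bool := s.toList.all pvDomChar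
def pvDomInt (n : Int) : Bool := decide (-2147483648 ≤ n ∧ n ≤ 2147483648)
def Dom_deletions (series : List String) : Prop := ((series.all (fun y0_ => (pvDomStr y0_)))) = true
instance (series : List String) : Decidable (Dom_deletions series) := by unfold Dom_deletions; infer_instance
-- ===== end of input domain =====

-- B replaces A's running-`last` single pass by divide and conquer over index ranges of a lengths table (alternative decomposition, same cost).

-- ===== PORT A =====
-- single pass: state (dels, last); the isinstance branch is vacuous for List String inputs
def deletions (series : List String) : Int :=
  (series.foldl
    (fun (st : Int × String) item =>
      (if PySem.Str.len item < PySem.Str.len st.2 then st.1 + 1 else st.1, item))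
    (0, "")).1

-- ===== PORT B =====
-- divide and conquer on the index range [lo, hi) of the lengths table; the Python indexing
-- lens[mid], lens[mid-1] is always in range (lo < mid < hi ≤ len), so getD is exact here
def altCount (lens : List Int) (lo hi : Nat) : Int :=
  if hi - lo < 2 then 0
  else
    altCount lens lo ((lo + hi) / 2) + altCount lens ((lo + hi) / 2) hi +
      (if lens.getD ((lo + hi) / 2) 0 < lens.getD ((lo + hi) / 2 - 1) 0 then 1 else 0)
termination_by hi - lo
decreasing_by all_goals omega

def deletions_alt (series : List String) : Int :=
  let lens := series.map (fun x => PySem.Str.len x)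
  altCount lens 0 lens.length

-- ===== PRECONDITION & SPEC =====
def Spec_deletions (series : List String) (out : Int) : Prop := out = deletions_alt series
instance (series : List String) (out : Int) : Decidable (Spec_deletions series out) := by unfold Spec_deletions; infer_instance

-- ===== CLAIM (what is proved, stated in full; the proofs are below) =====
def Claim_equal_deletions : Prop := ∀ (series : List String), Dom_deletions series → Spec_deletions series (deletions series)

-- ===== LEMMAS AND PROOFS =====

-- descent count with a previous value carried along (shape of A's loop)
def cntDec (prev : Int) : List Int → Int
  | [] => 0
  | x :: xs => (if x < prev then 1 else 0) + cntDec x xs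

-- descent count on a window: descents lens[lo+i] < lens[lo+i-1] for 0 < i < n
def pc (lens : List Int) : Nat → Nat → Int
  | _, 0 => 0
  | _, 1 => 0
  | lo, n + 2 =>
      (if lens.getD (lo + 1) 0 < lens.getD lo 0 then 1 else 0) + pc lens (lo + 1) (n + 1)

theorem deletions_foldl_eq (series : List String) :
    ∀ (d : Int) (last : String),
      (series.foldl
        (fun (st : Int × String) item =>
          (if PySem.Str.len item < PySem.Str.len st.2 then st.1 + 1 else st.1, item))
        (d, last)).1
      = d + cntDec (PySem.Str.len last) (series.map PySem.Str.len) := by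
  induction series with
  | nil => intro d last; simp [cntDec]
  | cons s ss ih =>
      intro d last
      simp only [List.foldl_cons, List.map_cons, cntDec, ih]
      split_ifs <;> ring

-- splitting a window at an interior point adds the boundary descent
theorem pc_split (lens : List Int) (m k : Nat) (hm : 1 ≤ m) (hk : 1 ≤ k) :
    ∀ lo, pc lens lo (m + k)
      = pc lens lo m + pc lens (lo + m) k +
        (if lens.getD (lo + m) 0 < lens.getD (lo + m - 1) 0 then 1 else 0) := by
  induction m with
  | zero => omega
  | succ m ih =>
      intro lo
      cases m with
      | zero =>
          obtain ⟨k', rfl⟩ : ∃ k', k = k' + 1 := ⟨k - 1, by omega⟩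
          have h1 : 0 + 1 + (k' + 1) = k' + 2 := by omega
          rw [h1]
          show (if _ then _ else _) + pc lens (lo + 1) (k' + 1) = _
          simp only [pc]
          have h2 : lo + (0 + 1) = lo + 1 := by omega
          rw [h2]
          simp
          ring
      | succ m' =>
          have h2 : m' + 1 + 1 + k = (m' + k) + 2 := by omega
          rw [h2]
          show _ + pc lens (lo + 1) (m' + k + 1) = _
          have h3 : m' + k + 1 = (m' + 1) + k := by omega
          rw [h3, ih (by omega) (lo + 1)]
          show _ = ((if _ then _ else _) + pc lens (lo + 1) (m' + 1)) + _ + _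
          have h4 : lo + 1 + (m' + 1) = lo + (m' + 1 + 1) := by omega
          rw [h4]
          ring

theorem altCount_eq_pc (lens : List Int) : ∀ lo hi, altCount lens lo hi = pc lens lo (hi - lo) := by
  intro lo hi
  induction hgen : hi - lo using Nat.strong_induction_on generalizing lo hi with
  | _ n ih =>
  subst hgen
  rw [altCount]
  by_cases h : hi - lo < 2
  · rw [if_pos h]
    interval_cases hn : (hi - lo) <;> simp [pc]
  · rw [if_neg h]
    have hm : 1 ≤ (lo + hi) / 2 - lo := by omega
    have hk : 1 ≤ hi - (lo + hi) / 2 := by omega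
    have hsum : ((lo + hi) / 2 - lo) + (hi - (lo + hi) / 2) = hi - lo := by omega
    rw [ih ((lo + hi) / 2 - lo) (by omega) lo ((lo + hi) / 2) rfl,
        ih (hi - (lo + hi) / 2) (by omega) ((lo + hi) / 2) hi rfl,
        ← hsum, pc_split lens _ _ hm hk lo]
    have : lo + ((lo + hi) / 2 - lo) = (lo + hi) / 2 := by omega
    rw [this]

-- shifting the window past a head element
theorem pc_cons (x : Int) (lens : List Int) : ∀ n lo, pc (x :: lens) (lo + 1) n = pc lens lo n := by
  intro n
  induction n using Nat.strong_induction_on with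
  | _ n ih =>
  intro lo
  match n with
  | 0 => simp [pc]
  | 1 => simp [pc]
  | n + 2 =>
      show (if _ then _ else _) + pc (x :: lens) (lo + 1 + 1) (n + 1) = _
      rw [ih (n + 1) (by omega) (lo + 1)]
      simp [pc, List.getD]

theorem pc_eq_cntDec : ∀ (lens : List Int), (∀ y ∈ lens, 0 ≤ y) → pc lens 0 lens.length = cntDec 0 lens := by
  intro lens
  induction lens with
  | nil => intro _; simp [pc, cntDec]
  | cons x xs ih =>
      intro hnn
      have hx : ¬ x < 0 := not_lt.mpr (hnn x (by simp))
      -- cntDec 0 (x::xs) = cntDec x xs ; and cntDec x (y::ys) matches pc's boundary steps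
      suffices h : ∀ (pre : Int) (ys : List Int), pc (pre :: ys) 0 (ys.length + 1) = cntDec pre ys by
        have := h x xs
        simpa [pc, cntDec, hx, List.length_cons] using this
      intro pre ys
      induction ys generalizing pre with
      | nil => simp [pc, cntDec]
      | cons y ys ih2 =>
          show pc (pre :: y :: ys) 0 (ys.length + 2) = _
          rw [pc]
          have : pc (pre :: y :: ys) (0 + 1) (ys.length + 1) = pc (y :: ys) 0 (ys.length + 1) :=
            pc_cons pre (y :: ys) (ys.length + 1) 0
          rw [this, ih2 y]
          simp [cntDec, List.getD]

-- ===== VERDICT (by name: the statement is the Claim_ definition above) =====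
theorem deletions_spec : Claim_equal_deletions := by
  intro series _
  unfold Spec_deletions deletions deletions_alt
  rw [deletions_foldl_eq]
  show (0 : Int) + cntDec (PySem.Str.len "") _ = _
  have hlen0 : PySem.Str.len "" = 0 := by decide
  rw [hlen0, zero_add, altCount_eq_pc, Nat.sub_zero, pc_eq_cntDec]
  intro y hy
  simp only [List.mem_map] at hy
  obtain ⟨s, _, rfl⟩ := hy
  simp [PySem.Str.len_eq]
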